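-- pv_equiv track=rewrite | github.com/nimezhu/bam2x | lib/bam2x/Turing/TuringUtils.py | bitarray_to_rep
-- ===== SOURCE A (Python) =====
-- def bitarray_to_rep(bitstr):
--     s=""
--     for i in range(0,len(bitstr),2):
--         if bitstr[i] and (not bitstr[i+1]):
--             s+="E"
--         elif (not bitstr[i]) and bitstr[i+1]:
--             s+="i"
--         elif not bitstr[i] and not bitstr[i+1]:
--             s+="x"
--         else:
--             s+="_"
--     return s
-- ===== SOURCE B (Python) =====
-- def bitarray_to_rep(bitstr):
--     # Stage 1: the first bit of each pair alone decides the "base" letter: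
--     # 0 -> 'x', 1 -> 'E'.
--     out = ['E' if a else 'x' for a in bitstr[0::2]]
--     # Stage 2: a set second bit promotes the letter: 'x' -> 'i', 'E' -> '_'.
--     flip = {'x': 'i', 'E': '_'}
--     for k, b in enumerate(bitstr[1::2]):
--         if b:
--             out[k] = flip[out[k]]
--     return ''.join(out)
-- ===== Notes on version B (the rewrite author's own statement) =====
-- stated objective: alternative
-- what changed: Instead of one indexed loop dispatching on both bits of a pair with a 4-way if/elif chain, B splits the input into the two interleaved subsequences bitstr[0::2] and bitstr[1::2] and runs two staged passes: the even bits alone produce a base string ('x'/'E'), then the odd bits promote letters in place via a flip table ('x'->'i', 'E'->'_').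
import Mathlib
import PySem

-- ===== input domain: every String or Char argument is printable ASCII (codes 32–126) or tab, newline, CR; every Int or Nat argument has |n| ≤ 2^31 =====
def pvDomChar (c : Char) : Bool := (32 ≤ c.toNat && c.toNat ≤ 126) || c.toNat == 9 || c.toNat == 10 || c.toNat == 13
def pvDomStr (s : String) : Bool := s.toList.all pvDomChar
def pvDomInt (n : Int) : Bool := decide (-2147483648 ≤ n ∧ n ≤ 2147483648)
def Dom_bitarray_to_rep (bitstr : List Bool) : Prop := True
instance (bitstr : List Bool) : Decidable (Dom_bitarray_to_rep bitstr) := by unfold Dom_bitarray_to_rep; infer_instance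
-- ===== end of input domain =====

-- B replaces the indexed pair loop + 4-way if/elif by two staged passes over the interleaved
-- slices bitstr[0::2] / bitstr[1::2] (alternative decomposition, same cost).

-- ===== PORT A =====
-- Literal port of A: loop over range(0, len(bitstr), 2), branch chain, string accumulation
-- (built as List Char, String.ofList at the end). bitstr[i] / bitstr[i+1] are in range under
-- Pre_ (even length); outside Pre_ Python raises IndexError.
def bitarray_to_rep (bitstr : List Bool) : String :=
  String.ofList ((PySem.List.pyRange 0 (bitstr.length : Int) 2).foldl (fun s i =>
    if PySem.List.pyGetD bitstr i false && !PySem.List.pyGetD bitstr (i + 1) false then s ++ ['E']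
    else if !PySem.List.pyGetD bitstr i false && PySem.List.pyGetD bitstr (i + 1) false then s ++ ['i']
    else if !PySem.List.pyGetD bitstr i false && !PySem.List.pyGetD bitstr (i + 1) false then s ++ ['x']
    else s ++ ['_']) [])

-- ===== PORT B =====
-- hand port of the step-2 slice xs[0::2] (PySem.List.slice has no step): every other element from index 0 — exact
def pvEvery2 : List Bool → List Bool
  | [] => []
  | [a] => [a]
  | a :: _ :: t => a :: pvEvery2 t

-- the flip table {'x': 'i', 'E': '_'}; its getD default is unreachable (keys looked up are 'x'/'E')
def pvFlip : PySem.Dict Char Char := PySem.Dict.ofList [('x', 'i'), ('E', '_')]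

-- Stage 1: base letters from bitstr[0::2]; Stage 2: enumerate(bitstr[1::2]) promotes out[k] in place.
-- out[k] read/write is List.getD/List.set at k (k < len(out) always, and k ≥ 0, so .toNat is exact).
def bitarray_to_rep_alt (bitstr : List Bool) : String :=
  let out0 := (pvEvery2 bitstr).map (fun a => if a then 'E' else 'x')
  let out := (PySem.List.enumerate (pvEvery2 (bitstr.drop 1)) 0).foldl
    (fun out kb => if kb.2 then out.set kb.1.toNat (pvFlip.getD (out.getD kb.1.toNat ' ') ' ') else out)
    out0
  String.ofList out

-- ===== PRECONDITION & SPEC =====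
-- Pre_ excludes odd-length inputs: there A raises IndexError at bitstr[i+1].
def Pre_bitarray_to_rep (bitstr : List Bool) : Prop := bitstr.length % 2 = 0
instance (bitstr : List Bool) : Decidable (Pre_bitarray_to_rep bitstr) := by unfold Pre_bitarray_to_rep; infer_instance
def pvWitness_bitarray_to_rep : List Bool := [true, false, false, true]

def Spec_bitarray_to_rep (bitstr : List Bool) (out : String) : Prop := out = bitarray_to_rep_alt bitstr
instance (bitstr : List Bool) (out : String) : Decidable (Spec_bitarray_to_rep bitstr out) := by unfold Spec_bitarray_to_rep; infer_instance

-- ===== CLAIM (what is proved, stated in full; the proofs are below) =====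
def Claim_equal_bitarray_to_rep : Prop := ∀ (bitstr : List Bool), Dom_bitarray_to_rep bitstr → Pre_bitarray_to_rep bitstr → Spec_bitarray_to_rep bitstr (bitarray_to_rep bitstr)

-- ===== LEMMAS AND PROOFS =====

-- proof-side pairing of an even-length list, and the common pair → character table
def pvPairs : List Bool → List (Bool × Bool)
  | a :: b :: t => (a, b) :: pvPairs t
  | _ => []

def pvTable (p : Bool × Bool) : Char :=
  if p.1 && !p.2 then 'E' else if !p.1 && p.2 then 'i' else if !p.1 && !p.2 then 'x' else '_'

-- A's loop body applied at index pref.length into pref ++ a :: b :: t reads a and b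
-- and appends exactly pvTable (a, b).
theorem pv_foldA : ∀ (m : Nat) (t pref : List Bool) (s : List Char),
    t.length = 2 * m →
    ((List.range m).map (fun k : Nat => ((pref.length : Int)) + 2 * (k : Int))).foldl (fun s i =>
      if PySem.List.pyGetD (pref ++ t) i false && !PySem.List.pyGetD (pref ++ t) (i + 1) false then s ++ ['E']
      else if !PySem.List.pyGetD (pref ++ t) i false && PySem.List.pyGetD (pref ++ t) (i + 1) false then s ++ ['i']
      else if !PySem.List.pyGetD (pref ++ t) i false && !PySem.List.pyGetD (pref ++ t) (i + 1) false then s ++ ['x']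
      else s ++ ['_']) s
    = s ++ (pvPairs t).map pvTable := by
  intro m
  induction m with
  | zero =>
    intro t pref s hlen
    have ht : t = [] := List.eq_nil_of_length_eq_zero (by omega)
    subst ht
    simp [pvPairs]
  | succ m ih =>
    intro t pref s hlen
    match t, hlen with
    | a :: b :: t, hlen =>
      rw [List.range_succ_eq_map]
      simp only [List.map_cons, List.map_map, List.foldl_cons]
      have hget0 : PySem.List.pyGetD (pref ++ a :: b :: t) ((pref.length : Int) + 2 * ((0 : Nat) : Int)) false = a := by
        rw [show ((pref.length : Int) + 2 * ((0 : Nat) : Int)) = ((pref.length : Nat) : Int) by push_cast; ring]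
        rw [PySem.List.pyGetD_natCast]
        simp
      have hget1 : PySem.List.pyGetD (pref ++ a :: b :: t) ((pref.length : Int) + 2 * ((0 : Nat) : Int) + 1) false = b := by
        rw [show ((pref.length : Int) + 2 * ((0 : Nat) : Int) + 1) = ((pref.length + 1 : Nat) : Int) by push_cast; ring]
        rw [PySem.List.pyGetD_natCast]
        rw [List.getD_append_right pref _ false (pref.length + 1) (by omega)]
        simp
      rw [hget0, hget1]
      have hrest : (List.range m).map ((fun k : Nat => ((pref.length : Int)) + 2 * (k : Int)) ∘ Nat.succ)
          = (List.range m).map (fun k : Nat => (((pref ++ [a, b]).length : Int)) + 2 * (k : Int)) := by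
        apply List.map_congr_left
        intro k _
        simp only [Function.comp, List.length_append, List.length_cons, List.length_nil]
        push_cast
        ring
      have hassoc : pref ++ a :: b :: t = (pref ++ [a, b]) ++ t := by simp
      rw [hrest]
      conv_lhs => rw [hassoc]
      rw [ih t (pref ++ [a, b]) _ (by simp only [List.length_cons] at hlen; omega)]
      cases a <;> cases b <;> simp [pvPairs, pvTable]

-- B's stage-2 fold over enumerate(odds, pref.length) rewrites exactly the suffix rest,
-- elementwise: a set odd bit promotes the letter through pvFlip.
theorem pv_foldB : ∀ (odds : List Bool) (pref rest : List Char),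
    odds.length = rest.length →
    (PySem.List.enumerate odds (pref.length : Int)).foldl
      (fun out kb => if kb.2 then out.set kb.1.toNat (pvFlip.getD (out.getD kb.1.toNat ' ') ' ') else out)
      (pref ++ rest)
    = pref ++ List.zipWith (fun c b => if b then pvFlip.getD c ' ' else c) rest odds := by
  intro odds
  induction odds with
  | nil =>
    intro pref rest hlen
    have : rest = [] := List.eq_nil_of_length_eq_zero (by simpa using hlen.symm)
    subst this
    simp [PySem.List.enumerate_nil]
  | cons o odds ih =>
    intro pref rest hlen
    match rest, hlen with
    | r :: rest, hlen =>
      rw [PySem.List.enumerate_cons]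
      simp only [List.foldl_cons]
      have hstep : (if o then (pref ++ r :: rest).set ((pref.length : Int)).toNat
            (pvFlip.getD ((pref ++ r :: rest).getD ((pref.length : Int)).toNat ' ') ' ')
          else pref ++ r :: rest)
          = (pref ++ [if o then pvFlip.getD r ' ' else r]) ++ rest := by
        cases o <;> simp
      rw [hstep]
      have hcast : ((pref.length : Int) + 1) = (((pref ++ [if o then pvFlip.getD r ' ' else r]).length : Nat) : Int) := by
        simp
      rw [hcast, ih _ rest (by simp only [List.length_cons] at hlen; omega)]
      simp [List.zipWith]

-- the two staged passes compose to the pair table on an even-length list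
theorem pv_stages : ∀ (m : Nat) (t : List Bool), t.length = 2 * m →
    List.zipWith (fun c b => if b then pvFlip.getD c ' ' else c)
      ((pvEvery2 t).map (fun a => if a then 'E' else 'x')) (pvEvery2 (t.drop 1))
    = (pvPairs t).map pvTable := by
  intro m
  induction m with
  | zero =>
    intro t hlen
    have : t = [] := List.eq_nil_of_length_eq_zero (by omega)
    subst this
    simp [pvEvery2, pvPairs]
  | succ m ih =>
    intro t hlen
    match t, hlen with
    | a :: b :: t, hlen =>
      have hodds : pvEvery2 ((a :: b :: t).drop 1) = b :: pvEvery2 (t.drop 1) := by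
        match t with
        | [] => simp [pvEvery2]
        | c :: t' => simp [pvEvery2]
      simp only [pvEvery2, List.map_cons, hodds, List.zipWith]
      rw [ih t (by simp only [List.length_cons] at hlen; omega)]
      cases a <;> cases b <;> simp [pvPairs, pvTable, pvFlip] <;> decide

-- stage-1 output and stage-2 index list have the same length on an even-length input
theorem pv_lenB : ∀ (m : Nat) (t : List Bool), t.length = 2 * m →
    (pvEvery2 (t.drop 1)).length = (pvEvery2 t).length := by
  intro m
  induction m with
  | zero =>
    intro t hlen
    have : t = [] := List.eq_nil_of_length_eq_zero (by omega)
    subst this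
    simp [pvEvery2]
  | succ m ih =>
    intro t hlen
    match t, hlen with
    | a :: b :: t, hlen =>
      have hodds : pvEvery2 ((a :: b :: t).drop 1) = b :: pvEvery2 (t.drop 1) := by
        match t with
        | [] => simp [pvEvery2]
        | c :: t' => simp [pvEvery2]
      simp only [pvEvery2, hodds, List.length_cons]
      rw [ih t (by simp only [List.length_cons] at hlen; omega)]

theorem pv_main (bitstr : List Bool) (h : bitstr.length % 2 = 0) :
    bitarray_to_rep bitstr = bitarray_to_rep_alt bitstr := by
  obtain ⟨m, hm⟩ : ∃ m, bitstr.length = 2 * m := ⟨bitstr.length / 2, by omega⟩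
  unfold bitarray_to_rep bitarray_to_rep_alt
  rw [PySem.List.pyRange_of_pos 0 (bitstr.length : Int) (by norm_num)]
  have hrange : (if (0 : Int) < (bitstr.length : Int) then (((bitstr.length : Int) - 0 + 2 - 1) / 2).toNat else 0) = m := by
    rw [hm]; push_cast
    split <;> omega
  rw [hrange]
  have keyA := pv_foldA m bitstr [] [] hm
  simp only [List.nil_append, List.length_nil, Nat.cast_zero] at keyA
  have hlenB : (pvEvery2 (bitstr.drop 1)).length = ((pvEvery2 bitstr).map (fun a => if a then 'E' else 'x')).length := by
    rw [List.length_map]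
    exact pv_lenB m bitstr hm
  have keyB := pv_foldB (pvEvery2 (bitstr.drop 1)) []
    ((pvEvery2 bitstr).map (fun a => if a then 'E' else 'x')) hlenB
  simp only [List.nil_append, List.length_nil, Nat.cast_zero] at keyB
  have hst := pv_stages m bitstr hm
  simp only [keyB, hst]
  exact congrArg String.ofList keyA

-- ===== VERDICT (by name: the statement is the Claim_ definition above) =====
theorem bitarray_to_rep_spec : Claim_equal_bitarray_to_rep := by
  intro bitstr _ hpre
  unfold Spec_bitarray_to_rep
  exact pv_main bitstr hpre
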